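-- pv_equiv track=rewrite | github.com/Erikct98/LinearCryptAnalysis | PyAES/mixcolumn_trail_search.py | find_input_mask
-- ===== SOURCE A (Python) =====
-- class Byyte:
--     def __init__(self, symbols=None):
--         if symbols is None:
--             symbols = [[] for _ in range(8)]
--         self.symbols = symbols
--
--     def mulp(self, s: int):
--         copy = self.clone()
--
--         res = Byyte(None)
--         while s:
--             if s & 1:
--                 res.add(copy)
--             s >>= 1
--             copy.mulp2()
--         return res
--
--     def mulp2(self):
--         head, self.symbols = self.symbols[0], self.symbols[1:]
--         self.symbols.append(head)
--         self.symbols[3].extend(head)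
--         self.symbols[4].extend(head)
--         self.symbols[6].extend(head)
--
--     def clone(self):
--         return Byyte([[x for x in s] for s in self.symbols])
--
--     def add(self, o: 'Byyte'):
--         for i in range(8):
--             self.symbols[i].extend(o.symbols[i])
--         return self
--
--         # Clean
--         # TODO
--
--     @classmethod
--     def concat(cls, os: 'Byyte') -> 'Byyte':
--         clones = [x.clone() for x in os]
--         for i in clones[1:]:
--             clones[0].symbols.extend(i.symbols)
--         return clones[0]
--
--     def __repr__(self):
--         return f"<class 'Byytes', symbols={repr(self.symbols)}>"
--
-- def fwd_map() :
--     ip = [Byyte([[(id_, i)] for i in range(7, -1, -1)]) for id_ in range(4)]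
--     return Byyte.concat([ip[i].mulp(2).add(ip[(i + 1) % 4].mulp(3)).add(ip[(i + 2) % 4]).add(ip[(i + 3) % 4]) for i in range(4)])
--
-- def find_input_mask(opm):
--     byytes = fwd_map()
--     indices = [idx for idx, elt in enumerate(f'{opm:0>32b}') if elt == "1"]
--     symbs = [x for idx in indices for x in byytes.symbols[idx]]
--     ipm = 0
--     for word, idx in symbs:
--         ipm ^= 1 << ((3-word) * 8 + idx)
--     return ipm
-- ===== SOURCE B (Python) =====
-- # B: replaces the symbolic Byyte machinery by a 32-entry table of input-mask
-- # integers, one per output bit, derived from GF(2^8) multiply-by-2/3 arithmetic;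
-- # the answer is then a plain XOR fold over the set bits of the output mask.
--
-- def _gfmul(a, b):
--     """GF(2^8) multiplication, AES polynomial x^8+x^4+x^3+x+1."""
--     r = 0
--     while b:
--         if b & 1:
--             r ^= a
--         a <<= 1
--         if a & 0x100:
--             a ^= 0x11B
--         b >>= 1
--     return r & 0xFF
--
-- def _bit_mask(coeff, b):
--     """Byte mask m with: bit b of coeff*x equals parity of m & x."""
--     m = 0
--     for j in range(8):
--         if (_gfmul(coeff, 1 << j) >> b) & 1:
--             m |= 1 << j
--     return m
--
-- _COEFFS = (2, 3, 1, 1)  # row of the MixColumns matrix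
--
-- def _masks():
--     masks = []
--     for i in range(32):
--         o, b = divmod(i, 8)
--         b = 7 - b  # output-mask strings are MSB first
--         ipm = 0
--         for k in range(4):
--             ipm |= _bit_mask(_COEFFS[(k - o) % 4], b) << ((3 - k) * 8)
--         masks.append(ipm)
--     return masks
--
-- MASKS = _masks()
--
-- def find_input_mask(opm):
--     ipm = 0
--     for idx, elt in enumerate(f'{opm:0>32b}'):
--         if elt == "1":
--             ipm ^= MASKS[idx]
--     return ipm
-- ===== Notes on version B (the rewrite author's own statement) =====
-- stated objective: simpler
-- what changed: Replaces the symbolic Byyte machinery (per-bit lists of (word,bit) pairs built by cloning, rotating and extending lists) with a fixed table of per-output-bit input-mask integers derived once from GF(2^8) multiply-by-two/three arithmetic, so the answer is a single XOR fold over the set bits of the output mask.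
import Mathlib
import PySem

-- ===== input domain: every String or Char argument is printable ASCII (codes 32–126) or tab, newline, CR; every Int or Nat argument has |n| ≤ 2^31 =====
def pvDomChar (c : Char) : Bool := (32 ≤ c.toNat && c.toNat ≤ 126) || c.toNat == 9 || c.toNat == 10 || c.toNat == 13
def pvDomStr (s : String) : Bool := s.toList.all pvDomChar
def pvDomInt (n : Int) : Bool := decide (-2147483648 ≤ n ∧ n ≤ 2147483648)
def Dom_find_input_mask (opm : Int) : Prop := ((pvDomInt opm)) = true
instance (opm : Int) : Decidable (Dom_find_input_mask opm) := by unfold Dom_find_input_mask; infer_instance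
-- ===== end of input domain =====

-- B replaces A's symbolic Byyte list machinery by a fixed table of per-output-bit
-- input-mask integers derived from GF(2^8) arithmetic, XOR-folded over the set bits of opm.

-- shared helper: the characters of f'{opm:0>32b}' (both Pythons contain this very expression)
-- binary digits of n, MSB first ('' for 0); fuel = n is enough since n halves each step
def pvNatBinGo : Nat → Nat → List Char
  | 0, _ => []
  | f + 1, n =>
    if n = 0 then []
    else pvNatBinGo f (n / 2) ++ [if n % 2 = 1 then '1' else '0']

def pvNatBin (n : Nat) : List Char := if n = 0 then ['0'] else pvNatBinGo n n

def pvBin32 (opm : Int) : List Char :=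
  let s := if opm < 0 then '-' :: pvNatBin (-opm).toNat else pvNatBin opm.toNat
  List.replicate (32 - s.length) '0' ++ s

-- ===== PORT A =====
-- Byyte.symbols : a list of per-bit symbol lists, each symbol a (word, idx) pair
def pvByyteAdd (a b : List (List (Int × Int))) : List (List (Int × Int)) :=
  (List.range 8).map (fun i => a.getD i [] ++ b.getD i [])

-- self.symbols[i].extend(head)
def pvExtendAt (l : List (List (Int × Int))) (i : Nat) (x : List (Int × Int)) :
    List (List (Int × Int)) :=
  l.modify i (· ++ x)

def pvMulp2 : List (List (Int × Int)) → List (List (Int × Int))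
  | [] => []
  | h :: t => pvExtendAt (pvExtendAt (pvExtendAt (t ++ [h]) 3 h) 4 h) 6 h

-- while s: if s & 1: res.add(copy); s >>= 1; copy.mulp2()   (fuel = s suffices: s halves)
def pvMulpGo : Nat → Nat → List (List (Int × Int)) → List (List (Int × Int)) →
    List (List (Int × Int))
  | 0, _, _, res => res
  | f + 1, s, copy, res =>
    if s = 0 then res
    else pvMulpGo f (s / 2) (pvMulp2 copy) (if s % 2 = 1 then pvByyteAdd res copy else res)

def pvMulp (b : List (List (Int × Int))) (s : Nat) : List (List (Int × Int)) :=
  pvMulpGo s s b (List.replicate 8 [])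

-- Byyte([[(id_, i)] for i in range(7, -1, -1)])
def pvIp (id_ : Int) : List (List (Int × Int)) :=
  (PySem.List.pyRange 7 (-1) (-1)).map (fun i => [(id_, i)])

-- fwd_map(): concat of the four rows (concat = append of the symbols lists)
def pvFwdMap : List (List (Int × Int)) :=
  (PySem.List.pyRange 0 4 1).flatMap (fun i =>
    pvByyteAdd
      (pvByyteAdd
        (pvByyteAdd (pvMulp (pvIp i) 2) (pvMulp (pvIp (PySem.Int.mod (i + 1) 4)) 3))
        (pvIp (PySem.Int.mod (i + 2) 4)))
      (pvIp (PySem.Int.mod (i + 3) 4)))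

def find_input_mask (opm : Int) : Int :=
  let byytes := pvFwdMap
  let indices := (PySem.List.enumerate (pvBin32 opm)).filterMap
    (fun p => if p.2 = '1' then some p.1 else none)
  let symbs := indices.flatMap (fun idx => PySem.List.pyGetD byytes idx [])
  symbs.foldl (fun ipm wi => PySem.Int.bxor ipm ((1 : Int) <<< ((3 - wi.1) * 8 + wi.2).toNat)) 0

-- ===== PORT B =====
-- GF(2^8) multiplication, AES polynomial 0x11B (fuel = b suffices: b halves each step)
def pvGfmulGo : Nat → Int → Nat → Int → Int
  | 0, _, _, r => r
  | f + 1, a, b, r =>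
    if b = 0 then r
    else
      let r' := if b % 2 = 1 then PySem.Int.bxor r a else r
      let a' := a <<< 1
      let a'' := if PySem.Int.band a' 256 ≠ 0 then PySem.Int.bxor a' 283 else a'
      pvGfmulGo f a'' (b / 2) r'

def pvGfmul (a : Int) (b : Nat) : Int := PySem.Int.band (pvGfmulGo b a b 0) 255

-- byte mask m with: bit b of coeff*x equals parity of m & x
def pvBitMask (coeff : Int) (b : Nat) : Int :=
  (List.range 8).foldl
    (fun m j =>
      if PySem.Int.band (pvGfmul coeff (1 <<< j) >>> b) 1 ≠ 0 then PySem.Int.bor m ((1 : Int) <<< j)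
      else m)
    0

def pvCOEFFS : List Int := [2, 3, 1, 1]

def pvMASKS : List Int :=
  (List.range 32).map (fun i =>
    let o : Nat := i / 8
    let b : Nat := 7 - i % 8
    (List.range 4).foldl
      (fun ipm k =>
        PySem.Int.bor ipm
          (pvBitMask (PySem.List.pyGetD pvCOEFFS (PySem.Int.mod ((k : Int) - (o : Int)) 4) 0) b <<<
            ((3 - k) * 8)))
      0)

def find_input_mask_alt (opm : Int) : Int :=
  (PySem.List.enumerate (pvBin32 opm)).foldl
    (fun ipm p => if p.2 = '1' then PySem.Int.bxor ipm (PySem.List.pyGetD pvMASKS p.1 0) else ipm) 0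

-- ===== PRECONDITION & SPEC =====
def Spec_find_input_mask (opm : Int) (out : Int) : Prop := out = find_input_mask_alt opm
instance (opm : Int) (out : Int) : Decidable (Spec_find_input_mask opm out) := by unfold Spec_find_input_mask; infer_instance

-- ===== CLAIM (what is proved, stated in full; the proofs are below) =====
def Claim_equal_find_input_mask : Prop := ∀ (opm : Int), Dom_find_input_mask opm → Spec_find_input_mask opm (find_input_mask opm)

-- ===== LEMMAS AND PROOFS =====

theorem pvBxor_eq_xor (a b : Int) : PySem.Int.bxor a b = Int.xor a b := by
  cases a <;> cases b <;>
    simp [PySem.Int.bxor, Int.xor] <;> omega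

theorem pvIntXor_assoc (a b c : Int) :
    Int.xor (Int.xor a b) c = Int.xor a (Int.xor b c) := by
  cases a <;> cases b <;> cases c <;> simp [Int.xor, Nat.xor_assoc]

theorem pvBxor_assoc (a b c : Int) :
    PySem.Int.bxor (PySem.Int.bxor a b) c = PySem.Int.bxor a (PySem.Int.bxor b c) := by
  simp [pvBxor_eq_xor, pvIntXor_assoc]

theorem pvZero_bxor (a : Int) : PySem.Int.bxor 0 a = a := by
  rw [PySem.Int.bxor_comm, PySem.Int.bxor_zero]

theorem pvFoldl_bxor_hoist {α : Type} (f : α → Int) (l : List α) (acc : Int) :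
    l.foldl (fun a x => PySem.Int.bxor a (f x)) acc =
      PySem.Int.bxor acc (l.foldl (fun a x => PySem.Int.bxor a (f x)) 0) := by
  induction l generalizing acc with
  | nil => simp [PySem.Int.bxor_zero]
  | cons h t ih =>
    simp only [List.foldl_cons]
    rw [ih (PySem.Int.bxor acc (f h)), ih (PySem.Int.bxor 0 (f h)), pvZero_bxor, pvBxor_assoc]

theorem pvFwdMap_length : pvFwdMap.length = 32 := by decide

theorem pvMASKS_length : pvMASKS.length = 32 := by decide

-- per output-bit contribution: A's fold over the symbol list equals XOR with B's table entry
theorem pvContrib (n : Nat) (acc : Int) :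
    (PySem.List.pyGetD pvFwdMap (n : Int) []).foldl
        (fun ipm wi => PySem.Int.bxor ipm ((1 : Int) <<< ((3 - wi.1) * 8 + wi.2).toNat)) acc =
      PySem.Int.bxor acc (PySem.List.pyGetD pvMASKS (n : Int) 0) := by
  by_cases h : n < 32
  · rw [pvFoldl_bxor_hoist]
    congr 1
    interval_cases n <;> decide
  · rw [PySem.List.pyGetD_natCast, PySem.List.pyGetD_natCast,
      List.getD_eq_default _ _ (by rw [pvFwdMap_length]; omega),
      List.getD_eq_default _ _ (by rw [pvMASKS_length]; omega)]
    simp [PySem.Int.bxor_zero]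

theorem pvMainLoop (L : List Char) (s : Nat) (acc : Int) :
    (((PySem.List.enumerate L (s : Int)).filterMap
            (fun p => if p.2 = '1' then some p.1 else none)).flatMap
          (fun idx => PySem.List.pyGetD pvFwdMap idx [])).foldl
        (fun ipm wi => PySem.Int.bxor ipm ((1 : Int) <<< ((3 - wi.1) * 8 + wi.2).toNat)) acc =
      (PySem.List.enumerate L (s : Int)).foldl
        (fun ipm p => if p.2 = '1' then PySem.Int.bxor ipm (PySem.List.pyGetD pvMASKS p.1 0) else ipm)
        acc := by
  induction L generalizing s acc with
  | nil => simp [PySem.List.enumerate_nil]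
  | cons c L ih =>
    rw [PySem.List.enumerate_cons]
    by_cases hc : c = '1'
    · simp only [List.filterMap_cons, List.foldl_cons, if_pos hc, List.flatMap_cons,
        List.foldl_append]
      rw [pvContrib]
      have : (s : Int) + 1 = ((s + 1 : Nat) : Int) := by push_cast; ring
      rw [this, ih]
    · simp only [List.filterMap_cons, List.foldl_cons, if_neg hc]
      have : (s : Int) + 1 = ((s + 1 : Nat) : Int) := by push_cast; ring
      rw [this, ih]

-- ===== VERDICT (by name: the statement is the Claim_ definition above) =====
theorem find_input_mask_spec : Claim_equal_find_input_mask := by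
  intro opm _
  unfold Spec_find_input_mask find_input_mask find_input_mask_alt
  have h := pvMainLoop (pvBin32 opm) 0 0
  simpa using h
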